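-- pv_equiv track=rewrite | github.com/tass25/planning | backend/partition/translation/dummy_data_generator.py | _gen_string_col
-- ===== SOURCE A (Python) =====
-- def _gen_string_col(n: int, labels: list[str], mixed_case: bool = False) -> list:
--     """String column with optional mixed-case adversarial values."""
--     cycle = (labels * ((n // len(labels)) + 1))[:n]
--     if mixed_case:
--         # Mix: all-caps, all-lower, title-case → exposes case-sensitivity bugs
--         variants = [
--             cycle[i].upper() if i % 3 == 0 else cycle[i].lower() if i % 3 == 1 else cycle[i].title()
--             for i in range(n)
--         ]
--         return variants
--     return cycle
-- ===== SOURCE B (Python) =====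
-- def _gen_string_col(n: int, labels: list[str], mixed_case: bool = False) -> list:
--     """Single indexed pass: pick labels[i % len(labels)] on the fly and dispatch the
--     case variant from a method table, instead of materialising a repeated list first."""
--     m = len(labels)
--     out = []
--     for i in range(n):
--         lab = labels[i % m]
--         if mixed_case:
--             lab = (lab.upper, lab.lower, lab.title)[i % 3]()
--         out.append(lab)
--     return out
-- ===== Notes on version B (the rewrite author's own statement) =====
-- stated objective: alternative
-- what changed: B drops A's two-stage build (replicate labels, slice to n, then map case variants) and instead makes a single indexed pass, selecting labels[i % len(labels)] on the fly and dispatching the case variant from a method table indexed by i % 3.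
import Mathlib
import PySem

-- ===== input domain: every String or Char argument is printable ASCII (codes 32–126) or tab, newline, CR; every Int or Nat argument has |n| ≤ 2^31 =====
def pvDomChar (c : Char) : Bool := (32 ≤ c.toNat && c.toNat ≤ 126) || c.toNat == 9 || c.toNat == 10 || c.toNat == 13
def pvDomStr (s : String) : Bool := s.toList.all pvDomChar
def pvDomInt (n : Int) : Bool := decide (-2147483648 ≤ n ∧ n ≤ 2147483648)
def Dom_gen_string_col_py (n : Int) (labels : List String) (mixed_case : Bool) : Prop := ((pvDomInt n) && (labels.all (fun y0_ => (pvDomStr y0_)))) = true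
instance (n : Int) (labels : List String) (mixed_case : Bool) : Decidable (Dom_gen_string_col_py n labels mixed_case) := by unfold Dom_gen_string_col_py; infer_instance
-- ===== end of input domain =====

-- B replaces A's build-repeated-list-then-slice-then-map strategy by a single indexed
-- pass with modular addressing (labels[i % m], case variant dispatched by i % 3).


-- ===== PORT A =====
-- str.title() has no PySem primitive: hand port, exact on ASCII (a letter is uppercased
-- when the previous character is not a letter, lowercased otherwise; non-letters unchanged —
-- ASCII "cased" characters are exactly the letters).
def pyTitleChars : Bool → List Char → List Char
  | _, [] => []
  | prevCased, c :: cs =>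
    if PySem.Chars.isalpha c then
      (if prevCased then PySem.Chars.lowerChar c else PySem.Chars.upperChar c) :: pyTitleChars true cs
    else c :: pyTitleChars false cs

def pyTitle (s : String) : String := String.ofList (pyTitleChars false s.toList)

-- 'labels * k' is (List.replicate k.toNat labels).flatten (exact: k ≤ 0 gives []).
-- cycle[i] is in range for every i in range(n) (cycle has length n there), so pyGetD is exact.
def gen_string_col_py (n : Int) (labels : List String) (mixed_case : Bool) : List String :=
  let cycle := PySem.List.slice ((List.replicate (PySem.Int.floordiv n (labels.length : Int) + 1).toNat labels).flatten) none (some n)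
  if mixed_case then
    (PySem.List.pyRange 0 n 1).map (fun i =>
      if PySem.Int.mod i 3 = 0 then PySem.Str.upper (PySem.List.pyGetD cycle i "")
      else if PySem.Int.mod i 3 = 1 then PySem.Str.lower (PySem.List.pyGetD cycle i "")
      else pyTitle (PySem.List.pyGetD cycle i ""))
  else cycle

-- ===== PORT B =====
-- Source B's tuple dispatch (lab.upper, lab.lower, lab.title)[i % 3]() is ported as selection
-- on i % 3 ∈ {0,1,2}; labels[i % m] is in range whenever the loop runs (Pre_ gives m > 0).
def gen_string_col_py_alt (n : Int) (labels : List String) (mixed_case : Bool) : List String :=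
  let m : Int := labels.length
  (PySem.List.pyRange 0 n 1).foldl (fun out i =>
    let lab := PySem.List.pyGetD labels (PySem.Int.mod i m) ""
    let lab := if mixed_case then
        (if PySem.Int.mod i 3 = 0 then PySem.Str.upper lab
         else if PySem.Int.mod i 3 = 1 then PySem.Str.lower lab
         else pyTitle lab)
      else lab
    out ++ [lab]) []

-- ===== PRECONDITION & SPEC =====
-- A raises ZeroDivisionError on labels = [] (even for n ≤ 0); Pre_ excludes exactly that.
def Pre_gen_string_col_py (n : Int) (labels : List String) (mixed_case : Bool) : Prop := labels ≠ []
instance (n : Int) (labels : List String) (mixed_case : Bool) : Decidable (Pre_gen_string_col_py n labels mixed_case) := by unfold Pre_gen_string_col_py; infer_instance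
def pvWitness_gen_string_col_py : Int × List String × Bool := (4, ["ab", "C d"], true)

def Spec_gen_string_col_py (n : Int) (labels : List String) (mixed_case : Bool) (out : List String) : Prop := out = gen_string_col_py_alt n labels mixed_case
instance (n : Int) (labels : List String) (mixed_case : Bool) (out : List String) : Decidable (Spec_gen_string_col_py n labels mixed_case out) := by unfold Spec_gen_string_col_py; infer_instance

-- ===== CLAIM (what is proved, stated in full; the proofs are below) =====
def Claim_equal_gen_string_col_py : Prop := ∀ (n : Int) (labels : List String) (mixed_case : Bool), Dom_gen_string_col_py n labels mixed_case → Pre_gen_string_col_py n labels mixed_case → Spec_gen_string_col_py n labels mixed_case (gen_string_col_py n labels mixed_case)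
-- ===== LEMMAS AND PROOFS =====

-- element j of labels*k is labels[j % len(labels)]
theorem flatten_replicate_getElem? {α : Type} (xs : List α) (k j : Nat)
    (hj : j < k * xs.length) :
    ((List.replicate k xs).flatten)[j]? = xs[j % xs.length]? := by
  induction k generalizing j with
  | zero => omega
  | succ k ih =>
    have hmul : (k + 1) * xs.length = k * xs.length + xs.length := by ring
    rw [List.replicate_succ, List.flatten_cons]
    by_cases h : j < xs.length
    · rw [List.getElem?_append_left h, Nat.mod_eq_of_lt h]
    · rw [List.getElem?_append_right (by omega)]
      rw [ih (j - xs.length) (by omega)]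
      conv_rhs => rw [Nat.mod_eq_sub_mod (show xs.length ≤ j by omega)]

-- A's truncated cycle IS the modular-index comprehension, for n > 0
theorem cycle_eq (n : Int) (labels : List String) (hl : labels ≠ []) (hn : 0 < n) :
    PySem.List.slice ((List.replicate (PySem.Int.floordiv n (labels.length : Int) + 1).toNat labels).flatten) none (some n)
      = (PySem.List.pyRange 0 n 1).map (fun i => PySem.List.pyGetD labels (PySem.Int.mod i (labels.length : Int)) "") := by
  have hm : 0 < labels.length := List.length_pos_iff.mpr hl
  set m := labels.length with hmdef
  set k := (PySem.Int.floordiv n (m : Int) + 1).toNat with hkdef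
  have hNk : n.toNat ≤ k * m := by
    have hfd : PySem.Int.floordiv n (m : Int) = n / (m : Int) :=
      PySem.Int.floordiv_eq_ediv_of_pos (by exact_mod_cast hm)
    have h1 : (m : Int) * (n / (m : Int)) + n % (m : Int) = n := Int.mul_ediv_add_emod n m
    have h2 : n % (m : Int) < m := Int.emod_lt_of_pos n (by exact_mod_cast hm)
    have h3 : 0 ≤ n / (m : Int) := Int.ediv_nonneg (by omega) (by exact_mod_cast hm.le)
    have hk : (k : Int) = n / (m : Int) + 1 := by rw [hkdef, hfd]; omega
    have hlt : (n : Int) < ((k * m : Nat) : Int) := by push_cast; nlinarith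
    omega
  rw [show PySem.List.slice ((List.replicate k labels).flatten) none (some n)
        = ((List.replicate k labels).flatten).take n.toNat from PySem.List.slice_to _ hn.le]
  rw [show n = ((n.toNat : Int)) from (Int.toNat_of_nonneg hn.le).symm]
  simp only [Int.toNat_natCast]
  apply List.ext_getElem?
  intro j
  by_cases hj : j < n.toNat
  · rw [List.getElem?_take_of_lt hj]
    rw [flatten_replicate_getElem? labels k j (by rw [← hmdef]; omega)]
    rw [PySem.List.getElem?_map_pyRange_zero _ n.toNat j (by omega)]
    simp only [PySem.Int.mod_natCast, PySem.List.pyGetD_natCast]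
    rw [List.getElem?_eq_getElem (by rw [← hmdef]; exact Nat.mod_lt _ hm)]
    rw [List.getD_eq_getElem _ _ (by rw [← hmdef]; exact Nat.mod_lt _ hm)]
  · -- j past the end: both sides are none
    rw [List.getElem?_eq_none (by simp; omega), List.getElem?_eq_none (by simp [PySem.List.length_pyRange_one]; omega)]

-- B's append-accumulator fold is the map over range(n)
theorem alt_eq_map (n : Int) (labels : List String) (mixed_case : Bool) :
    gen_string_col_py_alt n labels mixed_case =
      (PySem.List.pyRange 0 n 1).map (fun i =>
        let lab := PySem.List.pyGetD labels (PySem.Int.mod i (labels.length : Int)) ""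
        if mixed_case then
          (if PySem.Int.mod i 3 = 0 then PySem.Str.upper lab
           else if PySem.Int.mod i 3 = 1 then PySem.Str.lower lab
           else pyTitle lab)
        else lab) := by
  unfold gen_string_col_py_alt
  simpa using PySem.List.foldl_append_singleton_eq_map
    (f := fun i =>
        let lab := PySem.List.pyGetD labels (PySem.Int.mod i (labels.length : Int)) ""
        if mixed_case then
          (if PySem.Int.mod i 3 = 0 then PySem.Str.upper lab
           else if PySem.Int.mod i 3 = 1 then PySem.Str.lower lab
           else pyTitle lab)
        else lab)
    (l := PySem.List.pyRange 0 n 1) (acc := [])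

-- for n ≤ 0 A's cycle is empty
theorem cycle_nil (n : Int) (labels : List String) (hl : labels ≠ []) (hn : n ≤ 0) :
    PySem.List.slice ((List.replicate (PySem.Int.floordiv n (labels.length : Int) + 1).toNat labels).flatten) none (some n) = [] := by
  have hm : 0 < labels.length := List.length_pos_iff.mpr hl
  rcases lt_or_eq_of_le hn with h | h
  · have : PySem.Int.floordiv n (labels.length : Int) < 0 := by
      rw [PySem.Int.floordiv_eq_ediv_of_pos (by exact_mod_cast hm)]
      exact Int.ediv_neg_of_neg_of_pos h (by exact_mod_cast hm)
    rw [show (PySem.Int.floordiv n (labels.length : Int) + 1).toNat = 0 by omega]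
    simp [PySem.List.slice]
  · subst h
    rw [PySem.List.slice_to _ le_rfl]
    simp

-- ===== VERDICT (by name: the statement is the Claim_ definition above) =====
theorem gen_string_col_py_spec : Claim_equal_gen_string_col_py := by
  intro n labels mixed_case _ hpre
  unfold Spec_gen_string_col_py
  rw [alt_eq_map]
  unfold gen_string_col_py
  by_cases hn : 0 < n
  · rw [cycle_eq n labels hpre hn]
    cases mixed_case with
    | false => simp
    | true =>
      simp only [reduceIte]
      apply List.map_congr_left
      intro i hi
      have hmem := (PySem.List.mem_pyRange_one).mp hi
      rw [PySem.List.pyGetD_map_pyRange_of_nonneg _ n i "" hmem.1 hmem.2]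
  · have hnil : PySem.List.pyRange 0 n 1 = [] := PySem.List.pyRange_one_eq_nil (by omega)
    rw [hnil, cycle_nil n labels hpre (by omega)]
    cases mixed_case <;> simp
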